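-- pv_equiv track=rewrite | github.com/viczenith/Lamba | estateProject/estateApp/dynamic_slug_routing.py | is_slug_suspicious
-- ===== SOURCE A (Python) =====
-- def is_slug_suspicious(slug):
--     """
--     Check if slug looks like potential security attack
--
--     Patterns:
--     - SQL injection attempts
--     - Path traversal
--     - Script tags
--     """
--     suspicious_patterns = [
--         '../', '..\\',  # Path traversal
--         'union', 'select', 'insert', 'update', 'delete',  # SQL
--         '<script', 'javascript:', 'onerror',  # XSS
--         '%00', '%27', '%22',  # URL encoded
--     ]
--
--     slug_lower = slug.lower()
--     for pattern in suspicious_patterns: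
--         if pattern in slug_lower:
--             return True
--
--     return False
-- ===== SOURCE B (Python) =====
-- def is_slug_suspicious(slug):
--     """Single left-to-right scan: at each position, check whether any
--     suspicious pattern starts there (instead of one full substring
--     search per pattern)."""
--     patterns = ('../', '..\\',
--                 'union', 'select', 'insert', 'update', 'delete',
--                 '<script', 'javascript:', 'onerror',
--                 '%00', '%27', '%22')
--     s = slug.lower()
--     return any(s.startswith(p, i) for i in range(len(s)) for p in patterns)
-- ===== Notes on version B (the rewrite author's own statement) =====
-- stated objective: alternative
-- what changed: Replaces the per-pattern substring-search loop (one full 'in' scan of the slug for each pattern) by a single left-to-right scan over the slug's positions that tests at each position whether any pattern starts there.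
import Mathlib
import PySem

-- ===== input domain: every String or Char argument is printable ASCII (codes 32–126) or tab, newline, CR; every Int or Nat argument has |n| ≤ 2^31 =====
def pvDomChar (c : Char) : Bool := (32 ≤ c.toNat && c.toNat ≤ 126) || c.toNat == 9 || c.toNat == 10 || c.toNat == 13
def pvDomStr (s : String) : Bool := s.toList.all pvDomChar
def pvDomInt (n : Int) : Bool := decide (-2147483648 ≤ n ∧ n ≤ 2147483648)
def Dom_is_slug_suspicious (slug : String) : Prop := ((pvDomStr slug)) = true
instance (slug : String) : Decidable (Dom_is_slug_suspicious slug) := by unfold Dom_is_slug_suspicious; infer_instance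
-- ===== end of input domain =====

-- B replaces A's per-pattern substring-search loop by a single left-to-right
-- scan over the slug's positions, testing at each position whether any
-- suspicious pattern starts there (objective: alternative algorithm).

-- ===== PORT A =====
def pvSuspiciousPatterns : List String :=
  ["../", "..\\",
   "union", "select", "insert", "update", "delete",
   "<script", "javascript:", "onerror",
   "%00", "%27", "%22"]

def is_slug_suspicious (slug : String) : Bool :=
  let slug_lower := PySem.Str.lower slug
  -- 'for pattern in suspicious_patterns: if pattern in slug_lower: return True' / 'return False'
  pvSuspiciousPatterns.any (fun pattern => PySem.Str.isIn pattern slug_lower)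

-- ===== PORT B =====
def pvPatternsB : List (List Char) :=
  ["../".toList, "..\\".toList,
   "union".toList, "select".toList, "insert".toList, "update".toList, "delete".toList,
   "<script".toList, "javascript:".toList, "onerror".toList,
   "%00".toList, "%27".toList, "%22".toList]

-- 'any(s.startswith(p, i) for i in range(len(s)) for p in patterns)':
-- each recursive step is one position i (the current suffix); s.startswith(p, i)
-- is PySem.Chars.startswith on the suffix starting at i.
def pvScan : List Char → Bool
  | [] => false
  | c :: rest =>
      pvPatternsB.any (fun p => PySem.Chars.startswith (c :: rest) p) || pvScan rest

def is_slug_suspicious_alt (slug : String) : Bool :=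
  pvScan (PySem.Str.lower slug).toList

-- ===== PRECONDITION & SPEC =====
def Spec_is_slug_suspicious (slug : String) (out : Bool) : Prop := out = is_slug_suspicious_alt slug
instance (slug : String) (out : Bool) : Decidable (Spec_is_slug_suspicious slug out) := by unfold Spec_is_slug_suspicious; infer_instance

-- ===== CLAIM (what is proved, stated in full; the proofs are below) =====
def Claim_equal_is_slug_suspicious : Prop := ∀ (slug : String), Dom_is_slug_suspicious slug → Spec_is_slug_suspicious slug (is_slug_suspicious slug)

-- ===== LEMMAS AND PROOFS =====

lemma pvPatternsB_eq_map : pvPatternsB = pvSuspiciousPatterns.map String.toList := by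
  decide

lemma pvPatternsB_ne_nil : ∀ p ∈ pvPatternsB, p ≠ [] := by decide

-- the scan finds a pattern iff some pattern is an infix
lemma pvScan_iff (cs : List Char) :
    pvScan cs = true ↔ ∃ p ∈ pvPatternsB, p <:+: cs := by
  induction cs with
  | nil =>
      simp only [pvScan, Bool.false_eq_true, false_iff]
      rintro ⟨p, hp, hinf⟩
      exact pvPatternsB_ne_nil p hp (List.eq_nil_of_infix_nil hinf)
  | cons c rest ih =>
      simp only [pvScan, Bool.or_eq_true, List.any_eq_true, ih,
        PySem.Chars.startswith_iff]
      constructor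
      · rintro (⟨p, hp, hpre⟩ | ⟨p, hp, hinf⟩)
        · exact ⟨p, hp, hpre.isInfix⟩
        · exact ⟨p, hp, hinf.trans (List.suffix_cons c rest).isInfix⟩
      · rintro ⟨p, hp, hinf⟩
        rcases List.infix_cons_iff.mp hinf with hpre | hinf'
        · exact Or.inl ⟨p, hp, hpre⟩
        · exact Or.inr ⟨p, hp, hinf'⟩

theorem pv_main (slug : String) :
    is_slug_suspicious slug = is_slug_suspicious_alt slug := by
  rw [Bool.eq_iff_iff]
  rw [show (is_slug_suspicious_alt slug = true) ↔ _ from pvScan_iff _]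
  simp only [is_slug_suspicious, List.any_eq_true, PySem.Str.isIn_iff_infix,
    pvPatternsB_eq_map, List.mem_map]
  constructor
  · rintro ⟨p, hp, hinf⟩; exact ⟨_, ⟨p, hp, rfl⟩, hinf⟩
  · rintro ⟨_, ⟨p, hp, rfl⟩, hinf⟩; exact ⟨p, hp, hinf⟩

-- ===== VERDICT (by name: the statement is the Claim_ definition above) =====
theorem is_slug_suspicious_spec : Claim_equal_is_slug_suspicious := by
  intro slug _
  unfold Spec_is_slug_suspicious
  exact pv_main slug
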